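-- pv_equiv track=rewrite | github.com/pypi-data/pypi-mirror-402 | packages/ali-tool/ali_tool-0.1.1-py3-none-any.whl/ali_tool/plugins/tmux/scripts/distribute.py | group_panes_by_position
-- ===== SOURCE A (Python) =====
-- from collections import defaultdict
--
-- def group_panes_by_position(panes, dimension):
--     """Group panes by row or column based on dimension."""
--     groups = defaultdict(list)
--
--     if dimension == "width":
--         for pane in panes:
--             groups[pane["top"]].append(pane)
--     else:
--         for pane in panes:
--             groups[pane["left"]].append(pane)
--
--     for key in groups:
--         if dimension == "width":
--             groups[key].sort(key=lambda p: p["left"])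
--         else:
--             groups[key].sort(key=lambda p: p["top"])
--
--     return dict(groups)
-- ===== SOURCE B (Python) =====
-- def group_panes_by_position(panes, dimension):
--     """Group panes by row or column based on dimension."""
--     primary, secondary = ("top", "left") if dimension == "width" else ("left", "top")
--     keys = list(dict.fromkeys(p[primary] for p in panes))
--     return {
--         k: sorted((p for p in panes if p[primary] == k), key=lambda p: p[secondary])
--         for k in keys
--     }
-- ===== Notes on version B (the rewrite author's own statement) =====
-- stated objective: alternative
-- what changed: B replaces the defaultdict grouping pass plus per-group in-place sorts by an ordered dedup of the primary keys followed by a dict comprehension that filters-and-sorts the panes for each key; no mutable grouping dict is used.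
import Mathlib
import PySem

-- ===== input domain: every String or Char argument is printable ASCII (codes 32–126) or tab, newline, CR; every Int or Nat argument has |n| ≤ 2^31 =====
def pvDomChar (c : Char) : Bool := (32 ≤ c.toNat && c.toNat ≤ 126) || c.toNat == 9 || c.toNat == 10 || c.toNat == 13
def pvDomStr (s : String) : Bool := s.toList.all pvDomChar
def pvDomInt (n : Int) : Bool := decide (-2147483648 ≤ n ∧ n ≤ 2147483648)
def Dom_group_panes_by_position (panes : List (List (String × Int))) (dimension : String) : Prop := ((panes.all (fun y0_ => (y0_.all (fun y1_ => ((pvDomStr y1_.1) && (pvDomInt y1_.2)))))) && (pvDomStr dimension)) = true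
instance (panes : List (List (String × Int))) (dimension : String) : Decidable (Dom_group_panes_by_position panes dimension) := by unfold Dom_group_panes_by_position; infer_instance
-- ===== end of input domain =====

-- B replaces A's defaultdict grouping pass plus per-group in-place sorts by an ordered dedup
-- of the primary keys followed by a per-key filter-and-sort comprehension (objective: alternative).

-- pane["k"]: first-match lookup in the pane dict; Pre_ guarantees the key is present,
-- so the default 0 is never used on admitted inputs.
def paneGet (pane : List (String × Int)) (k : String) : Int :=
  (PySem.Dict.mk pane).getD k 0

-- ===== PORT A =====
def group_panes_by_position (panes : List (List (String × Int))) (dimension : String) : List (Int × List (List (String × Int))) :=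
  -- groups = defaultdict(list); first loop appends each pane under its key
  let groups : PySem.Dict Int (List (List (String × Int))) :=
    if dimension == "width" then
      panes.foldl (fun d pane => d.modify (paneGet pane "top") [] (· ++ [pane])) PySem.Dict.empty
    else
      panes.foldl (fun d pane => d.modify (paneGet pane "left") [] (· ++ [pane])) PySem.Dict.empty
  -- for key in groups: groups[key].sort(key=...)
  let groups2 : PySem.Dict Int (List (List (String × Int))) :=
    groups.keys.foldl (fun d k =>
      if dimension == "width" then
        d.modify k [] (fun g => PySem.List.sorted g (fun p => paneGet p "left") false)
      else
        d.modify k [] (fun g => PySem.List.sorted g (fun p => paneGet p "top") false)) groups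
  groups2.items

-- ===== PORT B =====
def group_panes_by_position_alt (panes : List (List (String × Int))) (dimension : String) : List (Int × List (List (String × Int))) :=
  let primary := if dimension == "width" then "top" else "left"
  let secondary := if dimension == "width" then "left" else "top"
  let keys := PySem.List.dedup (panes.map (fun p => paneGet p primary))
  keys.map (fun k =>
    (k, PySem.List.sorted (panes.filter (fun p => paneGet p primary == k))
          (fun p => paneGet p secondary) false))

-- ===== PRECONDITION & SPEC =====
-- Pre_: every pane dict carries both the "top" and "left" keys; a missing key makes the
-- Python raise KeyError (grouping uses one key, the sort lambda the other).
def Pre_group_panes_by_position (panes : List (List (String × Int))) (dimension : String) : Prop :=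
  ∀ pane ∈ panes, (PySem.Dict.mk pane).contains "top" = true ∧ (PySem.Dict.mk pane).contains "left" = true
instance (panes : List (List (String × Int))) (dimension : String) : Decidable (Pre_group_panes_by_position panes dimension) := by unfold Pre_group_panes_by_position; infer_instance

def pvWitness_group_panes_by_position : (List (List (String × Int))) × String :=
  ([[("top", 0), ("left", 2)], [("top", 0), ("left", 1)], [("top", 3), ("left", 0)]], "width")

def Spec_group_panes_by_position (panes : List (List (String × Int))) (dimension : String) (out : List (Int × List (List (String × Int)))) : Prop := out = group_panes_by_position_alt panes dimension
instance (panes : List (List (String × Int))) (dimension : String) (out : List (Int × List (List (String × Int)))) : Decidable (Spec_group_panes_by_position panes dimension out) := by unfold Spec_group_panes_by_position; infer_instance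

-- ===== CLAIM (what is proved, stated in full; the proofs are below) =====
def Claim_equal_group_panes_by_position : Prop := ∀ (panes : List (List (String × Int))) (dimension : String), Dom_group_panes_by_position panes dimension → Pre_group_panes_by_position panes dimension → Spec_group_panes_by_position panes dimension (group_panes_by_position panes dimension)

-- ===== LEMMAS AND PROOFS =====

-- The grouping fold: keys are the first-occurrence dedup of the pane keys, keys are Nodup,
-- and each key's value is the sublist of panes with that key.
theorem grouping_keys (panes : List (List (String × Int))) (key : List (String × Int) → Int) :
    (panes.foldl (fun d pane => d.modify (key pane) [] (· ++ [pane])) PySem.Dict.empty).keys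
      = PySem.List.dedup (panes.map key) := by
  rw [PySem.Dict.keys_foldl_modify_key]
  simp [PySem.Dict.keys_empty, PySem.Set.update, PySem.Set.ofList_eq_foldl, PySem.List.dedup_eq_ofList]

theorem grouping_getD (panes : List (List (String × Int))) (key : List (String × Int) → Int) (c : Int) :
    (panes.foldl (fun d pane => d.modify (key pane) [] (· ++ [pane])) PySem.Dict.empty).getD c []
      = panes.filter (fun p => key p == c) := by
  have h : panes.foldl (fun d pane => d.modify (key pane) [] (· ++ [pane])) PySem.Dict.empty
      = (panes.map (fun p => (key p, p))).foldl (fun d q => d.modify q.1 [] (· ++ [q.2])) PySem.Dict.empty := by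
    rw [List.foldl_map]
  rw [h, PySem.Dict.getD_foldl_modify_append, PySem.Dict.getD_empty]
  rw [List.filter_map]
  simp [Function.comp_def]

-- The sorting fold over a Nodup key list: keys are preserved and each listed key's value
-- gets sorted once; other keys are untouched.
theorem sorting_fold (f : List (List (String × Int)) → List (List (String × Int)))
    (kl : List Int) (d : PySem.Dict Int (List (List (String × Int))))
    (hnd : kl.Nodup) (hmem : ∀ k ∈ kl, k ∈ d.keys) :
    (kl.foldl (fun d k => d.modify k [] f) d).keys = d.keys ∧
    (∀ c, (kl.foldl (fun d k => d.modify k [] f) d).getD c []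
        = if c ∈ kl then f (d.getD c []) else d.getD c []) := by
  induction kl generalizing d with
  | nil => exact ⟨rfl, fun c => by simp⟩
  | cons k t ih =>
    have hk : k ∈ d.keys := hmem k (by simp)
    have hcont : d.contains k = true := by
      simpa [PySem.Dict.contains_iff_mem_keys] using hk
    have hkeys : (d.modify k [] f).keys = d.keys := by
      rw [PySem.Dict.keys_modify, PySem.Dict.keys_insert_of_contains _ _ hcont]
    have hmem' : ∀ j ∈ t, j ∈ (d.modify k [] f).keys := by
      intro j hj; rw [hkeys]; exact hmem j (by simp [hj])
    obtain ⟨ih1, ih2⟩ := ih (d.modify k [] f) hnd.of_cons hmem'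
    refine ⟨by simpa [hkeys] using ih1, ?_⟩
    intro c
    rw [List.foldl_cons, ih2 c]
    simp only [PySem.Dict.getD_modify]
    by_cases hck : c = k
    · subst hck
      have hct : c ∉ t := (List.nodup_cons.mp hnd).1
      simp [hct]
    · simp [hck, List.mem_cons]

-- The generic core: A's pipeline with grouping key pk and sort key sk equals B's.
theorem core (panes : List (List (String × Int))) (pk sk : String) :
    (let groups := panes.foldl (fun d pane => d.modify (paneGet pane pk) [] (· ++ [pane])) PySem.Dict.empty
     (groups.keys.foldl (fun d k => d.modify k [] (fun g => PySem.List.sorted g (fun p => paneGet p sk) false)) groups).items)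
      = (PySem.List.dedup (panes.map (fun p => paneGet p pk))).map (fun k =>
          (k, PySem.List.sorted (panes.filter (fun p => paneGet p pk == k)) (fun p => paneGet p sk) false)) := by
  set key := fun p => paneGet p pk with hkey
  set groups := panes.foldl (fun d pane => d.modify (key pane) [] (· ++ [pane])) PySem.Dict.empty with hg
  have hkeys : groups.keys = PySem.List.dedup (panes.map key) := grouping_keys panes key
  have hnd : groups.keys.Nodup := by
    rw [hkeys]; exact PySem.List.nodup_dedup _
  obtain ⟨h1, h2⟩ := sorting_fold (fun g => PySem.List.sorted g (fun p => paneGet p sk) false)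
      groups.keys groups hnd (fun k hk => hk)
  set d2 := groups.keys.foldl (fun d k => d.modify k [] (fun g => PySem.List.sorted g (fun p => paneGet p sk) false)) groups with hd2
  have hnd2 : d2.keys.Nodup := by rw [h1]; exact hnd
  rw [PySem.Dict.items_eq_map_keys d2 hnd2 []]
  rw [h1, hkeys]
  apply List.map_congr_left
  intro k hk
  have hkmem : k ∈ groups.keys := by rw [hkeys]; exact hk
  rw [h2 k]
  simp only [hkmem, if_pos]
  rw [grouping_getD panes key k]

-- ===== VERDICT (by name: the statement is the Claim_ definition above) =====
theorem group_panes_by_position_spec : Claim_equal_group_panes_by_position := by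
  intro panes dimension _ _
  unfold Spec_group_panes_by_position group_panes_by_position group_panes_by_position_alt
  by_cases hdim : dimension == "width" <;>
    simp only [hdim, Bool.false_eq_true, if_false, if_true] <;>
    exact core panes _ _
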